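-- pv_equiv track=rewrite | github.com/ayushman-roy/solved | google_venkat/question_1.py | number_finder
-- ===== SOURCE A (Python) =====
-- def set_bit_count(k):
--     prev_sum, curr_sum = 0, 0
--     curr_value, iter_var = 1, 1
--     while (curr_value <= k+1):
--         prev_sum = curr_sum
--         iter_var = curr_value
--         while (iter_var != 0):
--             if (iter_var & 1 == 1):
--                 curr_sum += 1
--             iter_var = iter_var >> 2
--         curr_value += 1
--     return prev_sum, curr_sum
--
-- def number_finder(k):
--     x = k // 2
--     while (True):
--         x_bit_set = set_bit_count(x)
--         if (k >= x_bit_set[0] and k < x_bit_set[1]):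
--             return x
--         elif (k > x_bit_set[0] and k > x_bit_set[1]):
--             x += 1
--         elif (k == x_bit_set[1]):
--             return x+1
--         else:
--             x -= 1
-- ===== SOURCE B (Python) =====
-- def number_finder(k):
--     # closed-form prefix sum of even-position set bits + binary search for the
--     # unique x with prefix(x) <= k < prefix(x+1)
--     def prefix(x):
--         # number of set bits at even bit positions over all of 1..x
--         total = 0
--         p = 0
--         while (1 << p) <= x:
--             t = 1 << p
--             total += (x + 1) // (2 * t) * t + max(0, (x + 1) % (2 * t) - t)
--             p += 2
--         return total
--     lo, hi = 0, 2 * k + 2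
--     while lo < hi:
--         mid = (lo + hi + 1) // 2
--         if prefix(mid) <= k:
--             lo = mid
--         else:
--             hi = mid - 1
--     return lo
-- ===== Notes on version B (the rewrite author's own statement) =====
-- stated objective: faster
-- what changed: A re-counts the cumulative even-position bit count from scratch at every probe of a bidirectional +-1 search; B computes that cumulative count in closed form per bit position and binary-searches for the unique x with count(x) <= k < count(x+1).
-- intended difference: On the 14 inputs k in {1,8,9,48,49,56,57,257,264,265,304,305,312,313}, A's upward search returns the first x whose cumulative count S(x) equals k even though S(x+1)=k too, violating the bracket condition S(x) <= k < S(x+1) that A's own primary branch tests; B returns the unique bracketing x, the intended value. — e.g. on number_finder(1): A returns 1, B returns 2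
import Mathlib
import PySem

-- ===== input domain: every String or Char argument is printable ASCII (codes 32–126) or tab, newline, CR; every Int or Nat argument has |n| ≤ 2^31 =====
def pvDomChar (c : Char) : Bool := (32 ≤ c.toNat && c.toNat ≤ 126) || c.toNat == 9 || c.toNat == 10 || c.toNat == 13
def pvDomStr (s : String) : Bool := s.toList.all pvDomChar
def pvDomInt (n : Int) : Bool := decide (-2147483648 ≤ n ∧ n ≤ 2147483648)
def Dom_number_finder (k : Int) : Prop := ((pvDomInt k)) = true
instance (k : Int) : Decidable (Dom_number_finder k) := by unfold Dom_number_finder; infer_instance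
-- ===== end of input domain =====

-- B replaces A's repeated from-scratch cumulative recounts inside a ±1 search by a
-- closed-form per-bit-position prefix count plus binary search (objective: faster).

-- ===== PORT A =====
-- inner while of set_bit_count: 'while iter != 0: if iter & 1 == 1: acc += 1; iter >>= 2';
-- the fuel only makes the loop total in Lean (iter.toNat + 1 steps always suffice, proved
-- below); the 0 < iter guard matches Python, which never runs this loop with iter ≤ 0,
-- since curr_value only takes the values 1, 2, …; 'iter >> 2' is Int '>>> 2'
def sbcInner : Nat → Int → Int → Int
  | 0, acc, _ => acc
  | fuel + 1, acc, iter =>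
    if 0 < iter then
      sbcInner fuel (if PySem.Int.band iter 1 = 1 then acc + 1 else acc) (iter >>> 2)
    else acc

-- outer while of set_bit_count: 'while curr_value <= k+1: prev=curr; <inner>; curr_value += 1'
-- (again fuel-total; (k+1).toNat + 1 steps always suffice)
def sbcOuter (k : Int) : Nat → Int → Int → Int → Int × Int
  | 0, prev, curr, _ => (prev, curr)
  | fuel + 1, prev, curr, cv =>
    if cv ≤ k + 1 then
      sbcOuter k fuel curr (sbcInner (cv.toNat + 1) curr cv) (cv + 1)
    else (prev, curr)

def set_bit_count (k : Int) : Int × Int := sbcOuter k ((k + 1).toNat + 1) 0 0 1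

-- the bidirectional search loop of number_finder; the fuel only makes the recursion
-- total in Lean: 2*k+4 steps always suffice when 0 ≤ k (proved below)
def loopAux (k : Int) : Nat → Int → Int
  | 0, x => x
  | fuel + 1, x =>
    let xbs := set_bit_count x
    if xbs.1 ≤ k ∧ k < xbs.2 then x
    else if xbs.1 < k ∧ xbs.2 < k then loopAux k fuel (x + 1)
    else if k = xbs.2 then x + 1
    else loopAux k fuel (x - 1)

def number_finder (k : Int) : Int := loopAux k (2 * k + 4).toNat (PySem.Int.floordiv k 2)

-- ===== PORT B =====
-- 'while (1 << p) <= x: t = 1 << p; total += (x+1)//(2*t)*t + max(0, (x+1)%(2*t) - t); p += 2'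
-- (fuel-total; x.toNat + 2 steps always suffice, proved below)
def prefixLoop (x : Int) : Nat → Int → Nat → Int
  | 0, total, _ => total
  | fuel + 1, total, p =>
    if (1 : Int) <<< p ≤ x then
      prefixLoop x fuel
        (total + PySem.Int.floordiv (x + 1) (2 * ((1 : Int) <<< p)) * ((1 : Int) <<< p) +
          max 0 (PySem.Int.mod (x + 1) (2 * ((1 : Int) <<< p)) - (1 : Int) <<< p)) (p + 2)
    else total

def pyPrefix (x : Int) : Int := prefixLoop x (x.toNat + 2) 0 0

-- 'while lo < hi: mid = (lo+hi+1)//2; if prefix(mid) <= k: lo = mid else: hi = mid-1'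
-- (fuel-total; (hi-lo).toNat + 1 steps always suffice, proved below)
def bsLoop (k : Int) : Nat → Int → Int → Int
  | 0, lo, _ => lo
  | fuel + 1, lo, hi =>
    if lo < hi then
      if pyPrefix (PySem.Int.floordiv (lo + hi + 1) 2) ≤ k then
        bsLoop k fuel (PySem.Int.floordiv (lo + hi + 1) 2) hi
      else bsLoop k fuel lo (PySem.Int.floordiv (lo + hi + 1) 2 - 1)
    else lo

def number_finder_alt (k : Int) : Int := bsLoop k ((2 * k + 2).toNat + 1) 0 (2 * k + 2)

-- ===== PRECONDITION & SPEC =====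
-- Pre_ excludes k < 0, where A's search loop never terminates (set_bit_count is (0,0)
-- there and every branch decrements x forever), so A returns on exactly the k admitted.
def Pre_number_finder (k : Int) : Prop := 0 ≤ k
instance (k : Int) : Decidable (Pre_number_finder k) := by unfold Pre_number_finder; infer_instance
def pvWitness_number_finder : Int := 7

-- On the 14 inputs k ∈ {1,8,9,48,49,56,57,257,264,265,304,305,312,313}, A's upward search
-- returns the first x whose cumulative even-position bit count S(x) equals k even though
-- S(x+1) = k as well, violating the bracket condition S(x) ≤ k < S(x+1) that A's own
-- primary branch tests; B returns the unique bracketing x, the intended value.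
def D_number_finder (k : Int) : Prop :=
  k ∈ ([1, 8, 9, 48, 49, 56, 57, 257, 264, 265, 304, 305, 312, 313] : List Int)
instance (k : Int) : Decidable (D_number_finder k) := by unfold D_number_finder; infer_instance

def Spec_number_finder (k : Int) (out : Int) : Prop := ¬ D_number_finder k → out = number_finder_alt k
instance (k : Int) (out : Int) : Decidable (Spec_number_finder k out) := by unfold Spec_number_finder; infer_instance

def pvDiffWitness_number_finder : Int := 1
def pvDiffWitnessOut_number_finder : Int × Int := (1, 2)

-- ===== CLAIM (what is proved, stated in full; the proofs are below) =====
def Claim_unchanged_number_finder : Prop := ∀ (k : Int), Dom_number_finder k → Pre_number_finder k → Spec_number_finder k (number_finder k)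
def Claim_changed_number_finder : Prop := Dom_number_finder (pvDiffWitness_number_finder) ∧ Pre_number_finder (pvDiffWitness_number_finder) ∧ D_number_finder (pvDiffWitness_number_finder) ∧ number_finder (pvDiffWitness_number_finder) = pvDiffWitnessOut_number_finder.1 ∧ number_finder_alt (pvDiffWitness_number_finder) = pvDiffWitnessOut_number_finder.2 ∧ pvDiffWitnessOut_number_finder.1 ≠ pvDiffWitnessOut_number_finder.2
def Claim_exact_number_finder : Prop := ∀ (k : Int), Dom_number_finder k → Pre_number_finder k → D_number_finder k → number_finder k ≠ number_finder_alt k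

-- ===== LEMMAS AND PROOFS =====

theorem pvShiftL_one_natCast (p : Nat) : ((1 : Int) <<< p) = ((2 ^ p : Nat) : Int) := by
  show Int.shiftLeft _ _ = _
  simp [Int.shiftLeft, Nat.shiftLeft_eq]

-- specification-level functions: fN v = number of set bits of v at even positions,
-- SN x = Σ_{v=1..x} fN v
-- fuel-structural (fuel = v always suffices) so the kernel can evaluate it
def fNAux : Nat → Nat → Nat
  | 0, _ => 0
  | fuel + 1, v => if v = 0 then 0 else v % 2 + fNAux fuel (v / 4)

def fN (v : Nat) : Nat := fNAux v v

theorem fNAux_eq : ∀ v fuel, v ≤ fuel → fNAux fuel v = fN v := by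
  intro v
  induction v using Nat.strong_induction_on with
  | _ v ih =>
    intro fuel hv
    match v, fuel with
    | 0, 0 => rfl
    | 0, f + 1 => simp [fNAux, fN]
    | w + 1, f + 1 =>
      have h4 : (w + 1) / 4 < w + 1 := by omega
      rw [fNAux, if_neg (by omega), ih _ h4 f (by omega)]
      show _ = fNAux (w + 1) (w + 1)
      rw [fNAux, if_neg (by omega), ih _ h4 w (by omega)]

def SN : Nat → Nat
  | 0 => 0
  | x + 1 => SN x + fN (x + 1)

def SI (x : Int) : Int := (SN x.toNat : Int)

theorem fN_pos (v : Nat) (h : v ≠ 0) : fN v = v % 2 + fN (v / 4) := by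
  conv_lhs => rw [fN]
  obtain ⟨w, rfl⟩ : ∃ w, v = w + 1 := ⟨v - 1, by omega⟩
  rw [fNAux, if_neg h, fNAux_eq _ _ (by omega)]

theorem SN_mono {a b : Nat} (h : a ≤ b) : SN a ≤ SN b := by
  induction b with
  | zero => simp_all
  | succ n ih =>
    rcases Nat.lt_or_ge a (n+1) with h' | h'
    · exact le_trans (ih (by omega)) (by simp [SN])
    · have : a = n + 1 := by omega
      simp [this]

theorem fN_odd {v : Nat} (h : v % 2 = 1) : 1 ≤ fN v := by
  rw [fN_pos v (by omega), h]; omega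

theorem SN_lb (k : Nat) : k + 1 ≤ SN (2 * k + 2) := by
  induction k with
  | zero => decide
  | succ n ih =>
    have e1 : SN (2 * n + 2 + 1) = SN (2 * n + 2) + fN (2 * n + 2 + 1) := rfl
    have e2 : SN (2 * n + 2 + 1 + 1) = SN (2 * n + 2 + 1) + fN (2 * n + 2 + 1 + 1) := rfl
    have h2 : 1 ≤ fN (2 * n + 2 + 1) := fN_odd (by omega)
    have h3 : 2 * (n + 1) + 2 = 2 * n + 2 + 1 + 1 := by omega
    rw [h3]
    omega

-- ---- A-side bridge: set_bit_count k = (SI k, SI (k+1)) ----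
theorem sbcInner_spec : ∀ (fuel : Nat) (acc iter : Int), 0 ≤ iter → iter.toNat < fuel →
    sbcInner fuel acc iter = acc + (fN iter.toNat : Int) := by
  intro fuel
  induction fuel with
  | zero => intro acc iter h0 hn; omega
  | succ f ih =>
    intro acc iter h0 hn
    by_cases hp : 0 < iter
    · obtain ⟨m, rfl⟩ : ∃ m : Nat, iter = (m : Int) := ⟨iter.toNat, by omega⟩
      have hm : 0 < m := by omega
      rw [sbcInner, if_pos hp]
      have hsh : ((m : Int) >>> 2) = ((m / 4 : Nat) : Int) := by
        show ((m >>> 2 : Nat) : Int) = _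
        rw [Nat.shiftRight_eq_div_pow]
      have hband : PySem.Int.band (m : Int) 1 = ((m % 2 : Nat) : Int) := by
        rw [PySem.Int.band_of_nonneg (by omega) (by omega)]
        have h1 : (1 : Int).toNat = 1 := rfl
        have h2 : ((m : Int)).toNat = m := by omega
        rw [h1, h2, Nat.and_one_is_mod]
      have hrec := ih (if PySem.Int.band (m : Int) 1 = 1 then acc + 1 else acc)
        ((m / 4 : Nat) : Int) (by omega) (by simp only [Int.toNat_natCast]; omega)
      rw [hsh, hrec]
      have htm : ((m : Int)).toNat = m := by omega
      have htd : (((m / 4 : Nat) : Int)).toNat = m / 4 := by omega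
      rw [htm, htd, fN_pos m (by omega)]
      by_cases hb : m % 2 = 1
      · rw [if_pos (by rw [hband]; exact_mod_cast congrArg (Nat.cast : Nat → Int) hb), hb]
        push_cast; ring
      · rw [if_neg (by rw [hband]; intro hcon; apply hb; exact_mod_cast hcon)]
        have : m % 2 = 0 := by omega
        rw [this]
        push_cast; ring
    · have h1 : iter = 0 := by omega
      subst h1
      rw [sbcInner, if_neg (by omega)]
      simp [fN, fNAux]

theorem SI_succ (x : Int) (hx : 0 ≤ x) : SI (x + 1) = SI x + (fN (x + 1).toNat : Int) := by
  unfold SI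
  have h1 : (x + 1).toNat = x.toNat + 1 := by omega
  rw [h1, SN]
  push_cast; ring

theorem sbcOuter_spec (k : Int) : ∀ (fuel : Nat) (cv prev curr : Int), 2 ≤ cv → cv ≤ k + 2 →
    (k + 2 - cv).toNat < fuel → prev = SI (cv - 2) → curr = SI (cv - 1) →
    sbcOuter k fuel prev curr cv = (SI k, SI (k + 1)) := by
  intro fuel
  induction fuel with
  | zero => intro cv prev curr h2 hk hj hprev hcurr; omega
  | succ f ih =>
    intro cv prev curr h2 hk hj hprev hcurr
    by_cases h : cv ≤ k + 1
    · rw [sbcOuter, if_pos h]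
      have hinner : sbcInner (cv.toNat + 1) curr cv = SI cv := by
        rw [sbcInner_spec (cv.toNat + 1) curr cv (by omega) (by omega), hcurr]
        have : cv = (cv - 1) + 1 := by ring
        rw [this, SI_succ (cv - 1) (by omega)]
        norm_num
      rw [hinner]
      apply ih (cv + 1) _ _ (by omega) (by omega) (by omega)
      · rw [hcurr]
        have : cv + 1 - 2 = cv - 1 := by ring
        rw [this]
      · have : cv + 1 - 1 = cv := by ring
        rw [this]
    · have hcv : cv = k + 2 := by omega
      rw [sbcOuter, if_neg h, hprev, hcurr, hcv]
      have e1 : k + 2 - 2 = k := by ring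
      have e2 : k + 2 - 1 = k + 1 := by ring
      rw [e1, e2]

theorem sbc_eq (k : Int) : set_bit_count k = (SI k, SI (k + 1)) := by
  unfold set_bit_count
  by_cases hk : 0 ≤ k
  · have hf : (k + 1).toNat + 1 = k.toNat + 2 := by omega
    rw [hf, sbcOuter, if_pos (by omega)]
    have h1 : sbcInner ((1 : Int).toNat + 1) 0 1 = SI 1 := by
      rw [sbcInner_spec _ 0 1 (by omega) (by norm_num)]
      simp [SI]
      decide
    rw [h1]
    apply sbcOuter_spec k (k.toNat + 1) 2 _ _ (by omega) (by omega) (by omega)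
    · simp [SI, SN]
    · norm_num
  · rw [sbcOuter, if_neg (by omega)]
    unfold SI
    have h1 : k.toNat = 0 := by omega
    have h2 : (k + 1).toNat = 0 := by omega
    rw [h1, h2]
    norm_num [SN]

-- ---- trajectory lemmas for A's search loop ----
theorem SI_mono {a b : Int} (h : a ≤ b) : SI a ≤ SI b := by
  unfold SI
  have : a.toNat ≤ b.toNat := by omega
  exact_mod_cast SN_mono this

theorem loop_down (k : Int) : ∀ (n : Nat) (x r : Int), 0 ≤ r → r ≤ x → (x - r).toNat = n →
    SI r ≤ k → k < SI (r + 1) → k < SI (x + 1) →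
    ∀ fuel, n + 1 ≤ fuel → loopAux k fuel x = r := by
  intro n
  induction n using Nat.strong_induction_on with
  | _ n ih =>
    intro x r hr hrx hn h1 h2 h3 fuel hfuel
    obtain ⟨f, rfl⟩ : ∃ f, fuel = f + 1 := ⟨fuel - 1, by omega⟩
    simp only [loopAux, sbc_eq]
    by_cases hxr : x = r
    · subst hxr
      rw [if_pos ⟨h1, h2⟩]
    · have hrx1 : r + 1 ≤ x := by omega
      have hSx : k < SI x := lt_of_lt_of_le h2 (SI_mono hrx1)
      rw [if_neg (by omega), if_neg (by omega), if_neg (by omega)]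
      exact ih (x - 1 - r).toNat (by omega) (x - 1) r hr (by omega) rfl h1 h2
        (by have : x - 1 + 1 = x := by ring
            rw [this]; exact hSx) f (by omega)

theorem loop_up (k : Int) : ∀ (n : Nat) (x m : Int), 0 ≤ x → x < m → (m - 1 - x).toNat = n →
    SI x ≤ k → k ≤ SI m → (∀ y, x < y → y < m → SI y < k) →
    ∀ fuel, n + 1 ≤ fuel → loopAux k fuel x = (if SI m = k then m else m - 1) := by
  intro n
  induction n using Nat.strong_induction_on with
  | _ n ih =>
    intro x m hx hxm hn h1 h2 hbetween fuel hfuel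
    obtain ⟨f, rfl⟩ : ∃ f, fuel = f + 1 := ⟨fuel - 1, by omega⟩
    simp only [loopAux, sbc_eq]
    by_cases hlast : x + 1 = m
    · rw [← hlast] at h2 ⊢
      by_cases hceq : SI (x + 1) = k
      · rw [if_neg (by omega), if_neg (by omega), if_pos (by omega), if_pos hceq]
      · have hlt : k < SI (x + 1) := by omega
        rw [if_pos ⟨h1, hlt⟩, if_neg (by omega)]
        omega
    · have hmid : SI (x + 1) < k := hbetween (x + 1) (by omega) (by omega)
      have hxk : SI x < k := lt_of_le_of_lt (SI_mono (by omega : x ≤ x + 1)) hmid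
      rw [if_neg (by omega), if_pos (by omega)]
      exact ih (m - 1 - (x + 1)).toNat (by omega) (x + 1) m (by omega) (by omega) rfl
        (by omega) h2 (fun y hy1 hy2 => hbetween y (by omega) hy2) f (by omega)

-- ---- closed-form prefix count ----
def cntN (p x : Nat) : Nat := (x + 1) / 2 ^ (p + 1) * 2 ^ p + ((x + 1) % 2 ^ (p + 1) - 2 ^ p)

def gN (J x : Nat) : Nat := ∑ j ∈ Finset.range J, cntN (2 * j) x

theorem cnt_zero (p : Nat) : cntN p 0 = 0 := by
  unfold cntN
  have ht : 1 ≤ 2 ^ p := Nat.one_le_two_pow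
  have hT : 2 ^ (p + 1) = 2 * 2 ^ p := by rw [pow_succ]; ring
  rw [Nat.div_eq_of_lt (by omega), Nat.mod_eq_of_lt (by omega)]
  omega

theorem cnt_succ (p x : Nat) : cntN p (x + 1) = cntN p x + (x + 1) / 2 ^ p % 2 := by
  have ht : 0 < 2 ^ p := Nat.two_pow_pos p
  have hT : 2 ^ (p + 1) = 2 * 2 ^ p := by rw [pow_succ]; ring
  unfold cntN
  rw [hT]
  generalize htdef : 2 ^ p = t at *
  obtain ⟨q, hq⟩ : ∃ q, (x + 1) / (2 * t) = q := ⟨_, rfl⟩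
  obtain ⟨r, hr⟩ : ∃ r, (x + 1) % (2 * t) = r := ⟨_, rfl⟩
  have hqr : 2 * t * q + r = x + 1 := by rw [← hq, ← hr]; exact Nat.div_add_mod _ _
  have hrlt : r < 2 * t := by rw [← hr]; exact Nat.mod_lt _ (by omega)
  rw [hq, hr]
  have e1 : 2 * t * q = t * (2 * q) := by ring
  have hbit : (x + 1) / t % 2 = r / t := by
    have e0 : (x + 1) / t = 2 * q + r / t := by
      rw [show x + 1 = t * (2 * q) + r by omega, Nat.mul_add_div ht]
    have e2 : r / t < 2 := Nat.div_lt_of_lt_mul (by omega)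
    obtain ⟨sdiv, hs⟩ : ∃ sdiv, r / t = sdiv := ⟨_, rfl⟩
    rw [e0, hs]
    rw [hs] at e2
    omega
  rw [hbit]
  have hrt2 : t ≤ r → r / t = 1 := fun hle => by
    have h2 : r < (1 + 1) * t := by omega
    rw [Nat.div_eq_of_lt_le (by omega) h2]
  by_cases hc : r + 1 < 2 * t
  · have hd : (x + 2) / (2 * t) = q := by
      rw [show x + 2 = 2 * t * q + (r + 1) by omega, Nat.mul_add_div (by omega),
        Nat.div_eq_of_lt hc]
      omega
    have hm : (x + 2) % (2 * t) = r + 1 := by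
      rw [show x + 2 = 2 * t * q + (r + 1) by omega, Nat.mul_add_mod, Nat.mod_eq_of_lt hc]
    rw [hd, hm]
    by_cases hrt : r < t
    · rw [Nat.div_eq_of_lt hrt]
      omega
    · rw [hrt2 (by omega)]
      omega
  · have hr1 : r + 1 = 2 * t := by omega
    have e2 : 2 * t * (q + 1) = 2 * t * q + 2 * t := by ring
    have hd : (x + 2) / (2 * t) = q + 1 := by
      rw [show x + 2 = 2 * t * (q + 1) by omega, Nat.mul_div_cancel_left _ (by omega)]
    have hm : (x + 2) % (2 * t) = 0 := by
      rw [show x + 2 = 2 * t * (q + 1) by omega, Nat.mul_mod_right]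
    rw [hd, hm, hrt2 (by omega)]
    have e3 : (q + 1) * t = q * t + t := by ring
    omega

theorem cnt_bound (p x : Nat) : x + 1 ≤ 2 * cntN p x + 2 ^ p := by
  have ht : 0 < 2 ^ p := Nat.two_pow_pos p
  have hT : 2 ^ (p + 1) = 2 * 2 ^ p := by rw [pow_succ]; ring
  unfold cntN
  rw [hT]
  generalize htdef : 2 ^ p = t at *
  obtain ⟨q, hq⟩ : ∃ q, (x + 1) / (2 * t) = q := ⟨_, rfl⟩
  obtain ⟨r, hr⟩ : ∃ r, (x + 1) % (2 * t) = r := ⟨_, rfl⟩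
  have hqr : 2 * t * q + r = x + 1 := by rw [← hq, ← hr]; exact Nat.div_add_mod _ _
  have hrlt : r < 2 * t := by rw [← hr]; exact Nat.mod_lt _ (by omega)
  rw [hq, hr]
  have e1 : 2 * t * q = 2 * (q * t) := by ring
  omega

theorem bits_sum : ∀ (J v : Nat), v < 4 ^ J → fN v = ∑ j ∈ Finset.range J, v / 4 ^ j % 2 := by
  intro J
  induction J with
  | zero =>
    intro v hv
    have : v = 0 := by simpa using hv
    subst this
    simp [fN, fNAux]
  | succ n ih =>
    intro v hv
    rw [Finset.sum_range_succ']
    have e1 : ∀ j : Nat, v / 4 ^ (j + 1) % 2 = (v / 4) / 4 ^ j % 2 := by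
      intro j
      rw [Nat.div_div_eq_div_mul, ← pow_succ']
    simp only [e1, pow_zero, Nat.div_one]
    have h4 : v / 4 < 4 ^ n := by
      rw [Nat.div_lt_iff_lt_mul (by omega)]
      calc v < 4 ^ (n + 1) := hv
        _ = 4 ^ n * 4 := by rw [pow_succ]
    by_cases h0 : v = 0
    · subst h0
      simp [fN, fNAux]
    · rw [← ih (v / 4) h4, fN_pos v h0]
      omega

theorem g_eq (J : Nat) : ∀ x : Nat, x < 4 ^ J → gN J x = SN x := by
  intro x
  induction x with
  | zero =>
    intro _
    unfold gN
    simp [cnt_zero, SN]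
  | succ n ih =>
    intro hn
    have e1 : gN J (n + 1) = gN J n + ∑ j ∈ Finset.range J, (n + 1) / 2 ^ (2 * j) % 2 := by
      unfold gN
      rw [← Finset.sum_add_distrib]
      exact Finset.sum_congr rfl fun j _ => cnt_succ (2 * j) n
    have e2 : ∀ j : Nat, (2 : Nat) ^ (2 * j) = 4 ^ j := fun j => by
      rw [pow_mul]
      norm_num
    have e3 : fN (n + 1) = ∑ j ∈ Finset.range J, (n + 1) / 4 ^ j % 2 :=
      bits_sum J (n + 1) hn
    have e4 : ∑ j ∈ Finset.range J, (n + 1) / 2 ^ (2 * j) % 2 = fN (n + 1) := by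
      rw [e3]
      exact Finset.sum_congr rfl fun j _ => by rw [e2 j]
    rw [e1, ih (by omega), SN, e4]

-- ---- B-side bridge ----
def tailN (x j : Nat) : Nat :=
  if h : 4 ^ j ≤ x then cntN (2 * j) x + tailN x (j + 1) else 0
termination_by x + 1 - j
decreasing_by
  have : j < 4 ^ j := Nat.lt_pow_self (by omega)
  omega

theorem tail_eq (x : Nat) : ∀ (n j : Nat), x + 1 - j = n → tailN x j + gN j x = SN x := by
  intro n
  induction n using Nat.strong_induction_on with
  | _ n ih =>
    intro j hj
    by_cases h : 4 ^ j ≤ x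
    · rw [tailN, dif_pos h]
      have hjx : j < 4 ^ j := Nat.lt_pow_self (by omega)
      have hg : gN (j + 1) x = gN j x + cntN (2 * j) x := by
        unfold gN
        rw [Finset.sum_range_succ]
      have := ih (x + 1 - (j + 1)) (by omega) (j + 1) rfl
      omega
    · rw [tailN, dif_neg h]
      have := g_eq j x (by omega)
      omega

theorem int_cast_max (a b : Nat) : max (0 : Int) ((a : Int) - (b : Int)) = ((a - b : Nat) : Int) := by
  omega

theorem prefixLoop_spec (x : Int) (hx : 0 ≤ x) : ∀ (fuel j : Nat) (total : Int),
    x.toNat + 1 - 2 * j < fuel → prefixLoop x fuel total (2 * j) = total + (tailN x.toNat j : Int) := by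
  intro fuel
  induction fuel with
  | zero => intro j total hj; omega
  | succ f ih =>
    intro j total hj
    have epow : (4 : Nat) ^ j = 2 ^ (2 * j) := by
      rw [pow_mul]
      norm_num
    have hsh : ((1 : Int) <<< (2 * j)) = ((4 ^ j : Nat) : Int) := by
      rw [pvShiftL_one_natCast]
      congr 1
      rw [epow]
    by_cases h : 4 ^ j ≤ x.toNat
    · rw [prefixLoop, if_pos (by rw [hsh]; omega)]
      have hjx : j < 4 ^ j := Nat.lt_pow_self (by omega)
      have hjx2 : 2 * j < 4 ^ j := by
        rw [epow]
        exact Nat.lt_two_pow_self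
      have ecast : ((4 ^ j : Nat) : Int) = ((2 ^ (2 * j) : Nat) : Int) := by rw [epow]
      have e1 : (2 : Int) * ((2 ^ (2 * j) : Nat) : Int) = ((2 ^ (2 * j + 1) : Nat) : Int) := by
        push_cast
        rw [pow_succ]
        ring
      have e2 : x + 1 = ((x.toNat + 1 : Nat) : Int) := by omega
      rw [hsh, ecast, e1, e2, PySem.Int.floordiv_natCast, PySem.Int.mod_natCast, int_cast_max]
      have hc : (((x.toNat + 1) / 2 ^ (2 * j + 1) : Nat) : Int) * ((2 ^ (2 * j) : Nat) : Int) +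
          (((x.toNat + 1) % 2 ^ (2 * j + 1) - 2 ^ (2 * j) : Nat) : Int) =
          ((cntN (2 * j) x.toNat : Nat) : Int) := by
        unfold cntN
        push_cast
        ring
      rw [add_assoc, hc]
      have e4 : 2 * j + 2 = 2 * (j + 1) := by ring
      rw [e4, ih (j + 1) _ (by omega)]
      conv_rhs => rw [tailN]
      rw [dif_pos h]
      push_cast
      ring
    · rw [prefixLoop, if_neg (by rw [hsh]; omega), tailN, dif_neg h]
      norm_num

theorem pyPrefix_eq (x : Int) (hx : 0 ≤ x) : pyPrefix x = (SN x.toNat : Int) := by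
  unfold pyPrefix
  show prefixLoop x (x.toNat + 2) 0 (2 * 0) = (SN x.toNat : Int)
  rw [prefixLoop_spec x hx (x.toNat + 2) 0 0 (by omega)]
  have htail := tail_eq x.toNat (x.toNat + 1) 0 rfl
  have hg0 : gN 0 x.toNat = 0 := rfl
  omega

-- rN k = the unique x with SN x ≤ k < SN (x+1)
def rN (k : Nat) : Nat := Nat.findGreatest (fun x => SN x ≤ k) (2 * k + 2)

theorem rN_spec (k : Nat) : SN (rN k) ≤ k ∧ k < SN (rN k + 1) ∧ rN k < 2 * k + 2 := by
  have h0 : SN (rN k) ≤ k := by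
    have := Nat.findGreatest_spec (P := fun x => SN x ≤ k) (n := 2 * k + 2) (m := 0)
      (by omega) (by simp [SN])
    exact this
  have hle : rN k ≤ 2 * k + 2 := Nat.findGreatest_le _
  have hlt : rN k < 2 * k + 2 := by
    rcases Nat.lt_or_ge (rN k) (2 * k + 2) with h | h
    · exact h
    · exfalso
      have heq : rN k = 2 * k + 2 := by omega
      have := SN_lb k
      rw [heq] at h0
      omega
  refine ⟨h0, ?_, hlt⟩
  have := Nat.findGreatest_is_greatest (lt_add_one (rN k)) (by omega : rN k + 1 ≤ 2 * k + 2)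
  simp only [not_le] at this
  exact this

theorem rN_unique (k a : Nat) (h1 : SN a ≤ k) (h2 : k < SN (a + 1)) : a = rN k := by
  obtain ⟨hr1, hr2, hr3⟩ := rN_spec k
  rcases Nat.lt_trichotomy a (rN k) with h | h | h
  · exfalso
    have : SN (a + 1) ≤ SN (rN k) := SN_mono (by omega)
    omega
  · exact h
  · exfalso
    have : SN (rN k + 1) ≤ SN a := SN_mono (by omega)
    omega

theorem bs_eq (k : Int) (hk : 0 ≤ k) : ∀ (fuel : Nat) (lo hi : Int), 0 ≤ lo → lo ≤ hi →
    hi ≤ 2 * k + 2 → (hi - lo).toNat < fuel →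
    SN lo.toNat ≤ k.toNat → (rN k.toNat : Int) ≤ hi → lo ≤ (rN k.toNat : Int) →
    bsLoop k fuel lo hi = (rN k.toNat : Int) := by
  intro fuel
  induction fuel with
  | zero => intro lo hi h0 hlohi hhi hn hSlo hrhi hlor; omega
  | succ f ih =>
    intro lo hi h0 hlohi hhi hn hSlo hrhi hlor
    by_cases h : lo < hi
    · rw [bsLoop, if_pos h]
      have hmid : PySem.Int.floordiv (lo + hi + 1) 2 = (lo + hi + 1) / 2 :=
        PySem.Int.floordiv_eq_ediv_of_pos (by omega)
      have hmlo : lo < PySem.Int.floordiv (lo + hi + 1) 2 := by rw [hmid]; omega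
      have hmhi : PySem.Int.floordiv (lo + hi + 1) 2 ≤ hi := by rw [hmid]; omega
      set M := PySem.Int.floordiv (lo + hi + 1) 2 with hMdef
      have hMpre : pyPrefix M = (SN M.toNat : Int) := pyPrefix_eq M (by omega)
      by_cases hcond : pyPrefix M ≤ k
      · rw [if_pos hcond]
        have hSM : SN M.toNat ≤ k.toNat := by
          rw [hMpre] at hcond
          omega
        have hMr : M ≤ (rN k.toNat : Int) := by
          by_contra hcon
          push_neg at hcon
          have h1 : rN k.toNat < M.toNat := by omega
          have h2 : M.toNat ≤ 2 * k.toNat + 2 := by omega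
          have := Nat.findGreatest_is_greatest h1 h2
          exact this hSM
        exact ih M hi (by omega) (by omega) hhi (by omega) hSM hrhi hMr
      · rw [if_neg hcond]
        have hSM : k.toNat < SN M.toNat := by
          rw [hMpre] at hcond
          omega
        have hMr : (rN k.toNat : Int) ≤ M - 1 := by
          by_contra hcon
          push_neg at hcon
          have h1 : M.toNat ≤ rN k.toNat := by omega
          have := SN_mono h1
          have hr1 := (rN_spec k.toNat).1
          omega
        exact ih lo (M - 1) h0 (by omega) (by omega) (by omega) hSlo hMr hlor
    · rw [bsLoop, if_neg h]
      omega

theorem B_eq (k : Int) (hk : 0 ≤ k) : number_finder_alt k = (rN k.toNat : Int) := by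
  unfold number_finder_alt
  have hr := rN_spec k.toNat
  apply bs_eq k hk ((2 * k + 2).toNat + 1) 0 (2 * k + 2) (by omega) (by omega) (by omega) (by omega)
  · show SN 0 ≤ k.toNat
    simp [SN]
  · omega
  · omega

-- ---- threshold: for k ≥ 680 the start value k // 2 already overshoots ----
theorem SN_lb5 (x : Nat) (hx : x < 4 ^ 17) : 5 * (x + 1) ≤ 2 * SN x + 341 := by
  rw [← g_eq 17 x hx]
  unfold gN
  have hsub : ∑ j ∈ Finset.range 5, cntN (2 * j) x ≤ ∑ j ∈ Finset.range 17, cntN (2 * j) x :=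
    Finset.sum_le_sum_of_subset (by decide)
  have e5 : ∑ j ∈ Finset.range 5, cntN (2 * j) x =
      cntN 0 x + cntN 2 x + cntN 4 x + cntN 6 x + cntN 8 x := by
    simp only [Finset.sum_range_succ, Finset.sum_range_zero]
    norm_num
  have b0 := cnt_bound 0 x
  have b2 := cnt_bound 2 x
  have b4 := cnt_bound 4 x
  have b6 := cnt_bound 6 x
  have b8 := cnt_bound 8 x
  norm_num at b0 b2 b4 b6 b8
  omega

-- ---- the quirk check, kernel-decidable over k < 680 ----
-- list form of gN 17, kernel-evaluable by `decide`
def Sf (x : Nat) : Nat := ((List.range 17).map (fun j => cntN (2 * j) x)).sum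

theorem sum_map_range (n : Nat) (f : Nat → Nat) :
    ((List.range n).map f).sum = ∑ j ∈ Finset.range n, f j := by
  induction n with
  | zero => rfl
  | succ m ih => simp [List.range_succ, Finset.sum_range_succ, ih]

theorem Sf_eq (x : Nat) : Sf x = gN 17 x := sum_map_range 17 _

-- fuel-structural so that `decide` can evaluate it in the kernel
def leastB : Nat → Nat → Nat → Nat → Nat
  | 0, _, lo, _ => lo
  | fuel + 1, k, lo, hi =>
    if lo < hi then
      let mid := (lo + hi) / 2
      if k ≤ Sf mid then leastB fuel k lo mid else leastB fuel k (mid + 1) hi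
    else lo

def checkQ (kk : Nat) : Bool :=
  let x0 := kk / 2
  let m := leastB (2 * kk + 2) kk (x0 + 1) (2 * kk + 2)
  decide (Sf x0 ≤ kk) && decide (Sf m = kk) && decide (Sf (m + 1) = kk)

def DlistN : List Nat := [1, 8, 9, 48, 49, 56, 57, 257, 264, 265, 304, 305, 312, 313]

theorem least_spec (k : Nat) : ∀ (fuel lo hi : Nat), hi - lo ≤ fuel → lo ≤ hi → k ≤ Sf hi →
    (∀ a b, a ≤ b → b ≤ hi → Sf a ≤ Sf b) →
    lo ≤ leastB fuel k lo hi ∧ leastB fuel k lo hi ≤ hi ∧ k ≤ Sf (leastB fuel k lo hi) ∧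
      (∀ y, lo ≤ y → y < leastB fuel k lo hi → Sf y < k) := by
  intro fuel
  induction fuel with
  | zero =>
    intro lo hi hf hlh hkhi hmono
    have : lo = hi := by omega
    subst this
    refine ⟨le_refl _, le_refl _, hkhi, fun y _ hy => by simp [leastB] at hy; omega⟩
  | succ f ihf =>
    intro lo hi hf hlh hkhi hmono
    rw [leastB]
    by_cases h : lo < hi
    · rw [if_pos h]
      show _ ≤ (if k ≤ Sf ((lo + hi) / 2) then leastB f k lo ((lo + hi) / 2)
          else leastB f k ((lo + hi) / 2 + 1) hi) ∧ _
      have hm1 : lo ≤ (lo + hi) / 2 := by omega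
      have hm2 : (lo + hi) / 2 < hi := by omega
      by_cases hc : k ≤ Sf ((lo + hi) / 2)
      · rw [if_pos hc]
        obtain ⟨r1, r2, r3, r4⟩ := ihf lo ((lo + hi) / 2) (by omega) hm1 hc
          (fun a b hab hb => hmono a b hab (by omega))
        exact ⟨r1, by omega, r3, r4⟩
      · rw [if_neg hc]
        obtain ⟨r1, r2, r3, r4⟩ := ihf ((lo + hi) / 2 + 1) hi (by omega) (by omega) hkhi hmono
        refine ⟨by omega, r2, r3, fun y hy1 hy2 => ?_⟩
        rcases Nat.lt_or_ge y ((lo + hi) / 2 + 1) with hy | hy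
        · have : Sf y ≤ Sf ((lo + hi) / 2) := hmono _ _ (by omega) (by omega)
          omega
        · exact r4 y hy hy2
    · rw [if_neg h]
      have : lo = hi := by omega
      subst this
      exact ⟨le_refl _, le_refl _, hkhi, fun y _ hy => by omega⟩

-- mN k = least y ≥ k/2 + 1 with k ≤ SN y
theorem mN_exists (k : Nat) : ∃ y, k / 2 + 1 ≤ y ∧ k ≤ SN y := by
  refine ⟨2 * k + 2, by omega, ?_⟩
  have := SN_lb k
  omega

def mN (k : Nat) : Nat := Nat.find (mN_exists k)

theorem pow417 : (4 : Nat) ^ 17 = 17179869184 := by norm_num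

theorem leastB_eq_mN (k : Nat) (hk : k ≤ 2 ^ 31) : leastB (2 * k + 2) k (k / 2 + 1) (2 * k + 2) = mN k := by
  have hbound : 2 * k + 2 < 4 ^ 17 := by
    rw [pow417]
    have : (2 : Nat) ^ 31 = 2147483648 := by norm_num
    omega
  have hSf : ∀ y, y ≤ 2 * k + 2 → Sf y = SN y := fun y hy => by
    rw [Sf_eq]
    exact g_eq 17 y (by omega)
  have hSlb := SN_lb k
  obtain ⟨r1, r2, r3, r4⟩ := least_spec k (2 * k + 2) (k / 2 + 1) (2 * k + 2) (by omega) (by omega)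
    (by rw [hSf _ (le_refl _)]; omega)
    (fun a b hab hb => by rw [hSf a (by omega), hSf b hb]; exact SN_mono hab)
  have hfind : k / 2 + 1 ≤ mN k ∧ k ≤ SN (mN k) := Nat.find_spec (mN_exists k)
  have hmhi : mN k ≤ 2 * k + 2 := Nat.find_min' _ ⟨by omega, by omega⟩
  set l := leastB (2 * k + 2) k (k / 2 + 1) (2 * k + 2) with hl
  have h1 : mN k ≤ l := Nat.find_min' _ ⟨r1, by rw [← hSf l r2]; exact r3⟩
  have h2 : l ≤ mN k := by
    by_contra hcon
    push_neg at hcon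
    have hmlo : k / 2 + 1 ≤ mN k := hfind.1
    have := r4 (mN k) hmlo hcon
    rw [hSf (mN k) hmhi] at this
    exact absurd hfind.2 (by omega)
  omega

set_option maxRecDepth 100000 in
theorem check_decide : ∀ kk : Nat, kk < 680 → kk ∉ DlistN → checkQ kk = false := by
  decide

set_option maxRecDepth 100000 in
theorem check_true : ∀ kk ∈ DlistN, checkQ kk = true := by
  decide

-- ---- assembled characterizations of A ----
theorem SI_natCast (m : Nat) : SI (m : Int) = (SN m : Int) := by
  unfold SI
  simp

theorem mN_le (k : Nat) : mN k ≤ 2 * k + 2 := by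
  have := SN_lb k
  exact Nat.find_min' _ ⟨by omega, by omega⟩

theorem mN_ge (k : Nat) : k / 2 + 1 ≤ mN k ∧ k ≤ SN (mN k) := Nat.find_spec (mN_exists k)

theorem A_down (k : Int) (hk : 0 ≤ k) (h : (k.toNat : Int) < SI (PySem.Int.floordiv k 2)) :
    number_finder k = (rN k.toNat : Int) := by
  unfold number_finder
  obtain ⟨kN, rfl⟩ : ∃ kN : Nat, k = (kN : Int) := ⟨k.toNat, by omega⟩
  have htN : ((kN : Int)).toNat = kN := by omega
  rw [htN] at h ⊢
  have hx0 : PySem.Int.floordiv (kN : Int) 2 = ((kN / 2 : Nat) : Int) :=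
    PySem.Int.floordiv_natCast kN 2
  rw [hx0] at h ⊢
  rw [SI_natCast] at h
  obtain ⟨hr1, hr2, hr3⟩ := rN_spec kN
  have hrx : rN kN < kN / 2 := by
    by_contra hcon
    push_neg at hcon
    have := SN_mono hcon
    omega
  apply loop_down (kN : Int) ((kN / 2 : Nat) - rN kN) _ _ (by omega)
    (by exact_mod_cast Nat.le_of_lt hrx) (by omega)
  · rw [SI_natCast]
    exact_mod_cast hr1
  · have e : ((rN kN : Int) + 1) = ((rN kN + 1 : Nat) : Int) := by push_cast; ring
    rw [e, SI_natCast]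
    exact_mod_cast hr2
  · have e : (((kN / 2 : Nat) : Int) + 1) = ((kN / 2 + 1 : Nat) : Int) := by push_cast; ring
    rw [e, SI_natCast]
    have := SN_mono (Nat.le_succ (kN / 2))
    have : SN (kN / 2) ≤ SN (kN / 2 + 1) := this
    exact_mod_cast by omega
  · omega

theorem A_up (k : Int) (hk : 0 ≤ k) (h : SI (PySem.Int.floordiv k 2) ≤ (k.toNat : Int)) :
    number_finder k = (if SN (mN k.toNat) = k.toNat then (mN k.toNat : Int) else (mN k.toNat : Int) - 1) := by
  unfold number_finder
  obtain ⟨kN, rfl⟩ : ∃ kN : Nat, k = (kN : Int) := ⟨k.toNat, by omega⟩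
  have htN : ((kN : Int)).toNat = kN := by omega
  rw [htN] at h ⊢
  have hx0 : PySem.Int.floordiv (kN : Int) 2 = ((kN / 2 : Nat) : Int) :=
    PySem.Int.floordiv_natCast kN 2
  rw [hx0] at h ⊢
  rw [SI_natCast] at h
  obtain ⟨hm1, hm2⟩ := mN_ge kN
  have hmle := mN_le kN
  have hres := loop_up (kN : Int) ((mN kN : Nat) - 1 - kN / 2) ((kN / 2 : Nat) : Int) ((mN kN : Nat) : Int)
    (by omega) (by exact_mod_cast hm1) (by omega)
    (by rw [SI_natCast]; exact_mod_cast h)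
    (by rw [SI_natCast]; exact_mod_cast hm2)
    (fun y hy1 hy2 => by
      obtain ⟨yN, rfl⟩ : ∃ yN : Nat, y = (yN : Int) := ⟨y.toNat, by omega⟩
      rw [SI_natCast]
      have hylt : yN < mN kN := by exact_mod_cast hy2
      have hygt : kN / 2 < yN := by exact_mod_cast hy1
      have := Nat.find_min (mN_exists kN) hylt
      have hSN : SN yN < kN := by
        by_contra hcon
        exact this ⟨by omega, by omega⟩
      exact_mod_cast hSN)
    ((2 * (kN : Int) + 4).toNat) (by omega)
  rw [hres, SI_natCast]
  by_cases heq : SN (mN kN) = kN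
  · rw [if_pos (by exact_mod_cast heq), if_pos heq]
  · rw [if_neg (by exact_mod_cast heq), if_neg heq]

theorem D_iff (kN : Nat) : D_number_finder (kN : Int) ↔ kN ∈ DlistN := by
  unfold D_number_finder DlistN
  simp only [List.mem_cons, List.not_mem_nil, or_false]
  omega

theorem Sf_SN (y : Nat) (hy : y < 4 ^ 17) : Sf y = SN y := by
  rw [Sf_eq]
  exact g_eq 17 y hy

theorem mN_lt (k : Nat) (hval : SN (mN k) = k) : mN k < 2 * k + 2 := by
  have h1 := mN_le k
  have h2 := SN_lb k
  rcases Nat.lt_or_ge (mN k) (2 * k + 2) with h | h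
  · exact h
  · have : mN k = 2 * k + 2 := by omega
    rw [this] at hval
    omega

-- ===== VERDICT (by name: the statement is the Claim_ definition above) =====
theorem number_finder_spec : Claim_unchanged_number_finder := by
  intro k hdom hpre
  unfold Spec_number_finder
  intro hD
  have hk0 : 0 ≤ k := hpre
  obtain ⟨kN, rfl⟩ : ∃ kN : Nat, k = (kN : Int) := ⟨k.toNat, by omega⟩
  have hkb : kN ≤ 2 ^ 31 := by
    unfold Dom_number_finder pvDomInt at hdom
    simp at hdom
    have h31 : (2 : Nat) ^ 31 = 2147483648 := by norm_num
    omega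
  have htN : ((kN : Int)).toNat = kN := by omega
  rw [B_eq _ (by omega), htN]
  by_cases hcase : SI (PySem.Int.floordiv (kN : Int) 2) ≤ ((kN : Int))
  · -- upward case
    have hup := A_up (kN : Int) (by omega) (by rw [htN]; exact hcase)
    rw [htN] at hup
    rw [show PySem.Int.floordiv ((kN : Nat) : Int) 2 = ((kN / 2 : Nat) : Int) by
      exact_mod_cast PySem.Int.floordiv_natCast kN 2, SI_natCast] at hcase
    have hx0le : SN (kN / 2) ≤ kN := by exact_mod_cast hcase
    have hth : kN < 680 := by
      by_contra hge
      push_neg at hge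
      have hb : kN / 2 < 4 ^ 17 := by
        rw [pow417]
        omega
      have h5 := SN_lb5 (kN / 2) hb
      omega
    have hknot : kN ∉ DlistN := fun hmem => hD ((D_iff kN).mpr hmem)
    have hcq := check_decide kN hth hknot
    unfold checkQ at hcq
    simp only [] at hcq
    rw [leastB_eq_mN kN (by omega)] at hcq
    have hmle := mN_le kN
    obtain ⟨hm1, hm2⟩ := mN_ge kN
    have hb17 : 2 * kN + 3 < 4 ^ 17 := by
      rw [pow417]
      have : (2 : Nat) ^ 31 = 2147483648 := by norm_num
      omega
    rw [Sf_SN (kN / 2) (by omega), Sf_SN (mN kN) (by omega), Sf_SN (mN kN + 1) (by omega)] at hcq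
    rw [hup]
    by_cases hmeq : SN (mN kN) = kN
    · have hnext : SN (mN kN + 1) ≠ kN := by
        intro hcon
        simp [hx0le, hmeq, hcon] at hcq
      have hmono : SN (mN kN) ≤ SN (mN kN + 1) := SN_mono (by omega)
      have : mN kN = rN kN := rN_unique kN (mN kN) (by omega) (by omega)
      rw [if_pos hmeq, this]
    · rw [if_neg hmeq]
      have hgt : kN < SN (mN kN) := by omega
      have hSm1 : SN (mN kN - 1) ≤ kN := by
        rcases Nat.lt_or_ge (kN / 2) (mN kN - 1) with h | h
        · have := Nat.find_min (mN_exists kN) (show mN kN - 1 < mN kN by omega)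
          by_contra hcon
          exact this ⟨by omega, by omega⟩
        · have : SN (mN kN - 1) ≤ SN (kN / 2) := SN_mono (by omega)
          omega
      have hreq : mN kN - 1 = rN kN := by
        apply rN_unique kN _ hSm1
        have e : mN kN - 1 + 1 = mN kN := by omega
        rw [e]
        omega
      have : ((mN kN - 1 : Nat) : Int) = ((rN kN : Nat) : Int) := by exact_mod_cast congrArg (Nat.cast : Nat → Int) hreq
      omega
  · -- downward case
    push_neg at hcase
    have hdown := A_down (kN : Int) (by omega) (by rw [htN]; exact hcase)
    rw [htN] at hdown
    rw [hdown]

theorem number_finder_changed : Claim_changed_number_finder := by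
  unfold Claim_changed_number_finder pvDiffWitness_number_finder pvDiffWitnessOut_number_finder
  refine ⟨by decide, by decide, by decide, ?_, ?_, by decide⟩
  · have hup := A_up 1 (by omega) (by decide)
    have hm : mN 1 = 1 := by
      have h1 : mN 1 ≤ 1 := Nat.find_min' _ ⟨by omega, by decide⟩
      have h2 := (mN_ge 1).1
      omega
    have ht1 : ((1 : Int)).toNat = 1 := rfl
    rw [ht1] at hup
    rw [hup, hm, if_pos (by decide)]
    rfl
  · rw [B_eq 1 (by omega)]
    have hr : rN 1 = 2 := (rN_unique 1 2 (by decide) (by decide)).symm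
    have ht1 : ((1 : Int)).toNat = 1 := rfl
    rw [ht1, hr]
    rfl

theorem number_finder_tight : Claim_exact_number_finder := by
  intro k hdom hpre hD
  have hk0 : 0 ≤ k := hpre
  obtain ⟨kN, rfl⟩ : ∃ kN : Nat, k = (kN : Int) := ⟨k.toNat, by omega⟩
  have hmem : kN ∈ DlistN := (D_iff kN).mp hD
  have hkb : kN ≤ 2 ^ 31 := by
    unfold Dom_number_finder pvDomInt at hdom
    simp at hdom
    have h31 : (2 : Nat) ^ 31 = 2147483648 := by norm_num
    omega
  have htN : ((kN : Int)).toNat = kN := by omega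
  have hcq := check_true kN hmem
  unfold checkQ at hcq
  simp only [] at hcq
  rw [leastB_eq_mN kN (by omega)] at hcq
  have hmle := mN_le kN
  have hb17 : 2 * kN + 3 < 4 ^ 17 := by
    rw [pow417]
    have : (2 : Nat) ^ 31 = 2147483648 := by norm_num
    omega
  rw [Sf_SN (kN / 2) (by omega), Sf_SN (mN kN) (by omega), Sf_SN (mN kN + 1) (by omega)] at hcq
  simp only [Bool.and_eq_true, decide_eq_true_eq] at hcq
  obtain ⟨⟨hx0le, hmeq⟩, hm1eq⟩ := hcq
  have hup := A_up (kN : Int) (by omega)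
    (by rw [htN, show PySem.Int.floordiv ((kN : Nat) : Int) 2 = ((kN / 2 : Nat) : Int) by
          exact_mod_cast PySem.Int.floordiv_natCast kN 2, SI_natCast]
        exact_mod_cast hx0le)
  rw [htN] at hup
  rw [hup, if_pos hmeq, B_eq _ (by omega), htN]
  have hmlt : mN kN < 2 * kN + 2 := mN_lt kN hmeq
  have hle : mN kN + 1 ≤ rN kN := Nat.le_findGreatest (by omega) (by omega)
  intro hcon
  have : mN kN = rN kN := by exact_mod_cast hcon
  omega
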